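-- pv_equiv track=rewrite | github.com/PeiJieSun/agent-security-eval | agent_eval/skill_scanner/l1_text.py | _build_files_content
-- ===== SOURCE A (Python) =====
-- def _build_files_content(files: dict[str, str], max_chars: int = 60000) -> str:
--     parts = []
--     total = 0
--     for fp, text in files.items():
--         chunk = f"--- FILE: {fp} ---\n{text}\n"
--         if total + len(chunk) > max_chars:
--             chunk = chunk[:max_chars - total] + "\n[TRUNCATED]"
--             parts.append(chunk)
--             break
--         parts.append(chunk)
--         total += len(chunk)
--     return "\n".join(parts)
-- ===== SOURCE B (Python) =====
-- def _build_files_content(files: dict[str, str], max_chars: int = 60000) -> str: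
--     chunks = [f"--- FILE: {fp} ---\n{text}\n" for fp, text in files.items()]
--     cum = [0]
--     for c in chunks:
--         cum.append(cum[-1] + len(c))
--     cut = next((i for i in range(len(chunks)) if cum[i + 1] > max_chars), None)
--     if cut is None:
--         return "\n".join(chunks)
--     return "\n".join(chunks[:cut] + [chunks[cut][:max_chars - cum[cut]] + "\n[TRUNCATED]"])
-- ===== Notes on version B (the rewrite author's own statement) =====
-- stated objective: alternative
-- what changed: B builds the full chunk list first, computes a prefix-sum list of chunk lengths, locates the first overflowing index with a single search, and assembles the output by list slicing, instead of A's single fused loop carrying parts/total state.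
import Mathlib
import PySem

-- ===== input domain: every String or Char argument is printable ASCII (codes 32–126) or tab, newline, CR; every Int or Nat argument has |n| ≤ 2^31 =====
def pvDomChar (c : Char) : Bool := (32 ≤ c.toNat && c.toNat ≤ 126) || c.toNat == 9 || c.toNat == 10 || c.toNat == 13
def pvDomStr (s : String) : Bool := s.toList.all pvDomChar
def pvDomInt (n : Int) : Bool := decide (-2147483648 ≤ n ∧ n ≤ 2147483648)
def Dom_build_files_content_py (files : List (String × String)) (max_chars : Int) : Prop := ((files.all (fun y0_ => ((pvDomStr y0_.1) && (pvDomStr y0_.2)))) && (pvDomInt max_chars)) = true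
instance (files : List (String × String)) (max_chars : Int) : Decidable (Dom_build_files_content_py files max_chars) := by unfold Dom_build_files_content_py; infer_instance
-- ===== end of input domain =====

-- B assembles the same content via chunk list + prefix sums + one cutoff search (alternative decomposition, same cost).

-- ===== PORT A =====
-- the f-string "--- FILE: {fp} ---\n{text}\n", on the List Char side
def pvChunk (fp text : String) : List Char :=
  "--- FILE: ".toList ++ fp.toList ++ " ---".toList ++ ['\n'] ++ text.toList ++ ['\n']

-- A's loop: parts accumulated in order, total carried; truncate-and-break on overflow
def pvLoopA (max_chars : Int) : List (String × String) → Int → List (List Char)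
  | [], _ => []
  | (fp, text) :: rest, total =>
    let chunk := pvChunk fp text
    if total + (chunk.length : Int) > max_chars then
      [PySem.List.slice chunk none (some (max_chars - total)) ++ "\n[TRUNCATED]".toList]
    else
      chunk :: pvLoopA max_chars rest (total + (chunk.length : Int))

def build_files_content_py (files : List (String × String)) (max_chars : Int) : String :=
  String.ofList (PySem.Chars.join ['\n'] (pvLoopA max_chars files 0))

-- ===== PORT B =====
def build_files_content_py_alt (files : List (String × String)) (max_chars : Int) : String :=
  let chunks : List (List Char) := files.map (fun p => pvChunk p.1 p.2)
  -- cum.append(cum[-1] + len(c))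
  let cum : List Int := chunks.foldl (fun acc c => acc ++ [acc.getLastD 0 + (c.length : Int)]) [0]
  -- next((i for i in range(len(chunks)) if cum[i+1] > max_chars), None)
  match (List.range chunks.length).find? (fun i => decide (cum.getD (i + 1) 0 > max_chars)) with
  | none => String.ofList (PySem.Chars.join ['\n'] chunks)
  | some cut =>
      String.ofList (PySem.Chars.join ['\n']
        (chunks.take cut ++
          [PySem.List.slice (chunks.getD cut []) none (some (max_chars - cum.getD cut 0)) ++
            "\n[TRUNCATED]".toList]))

-- ===== PRECONDITION & SPEC =====
def Spec_build_files_content_py (files : List (String × String)) (max_chars : Int) (out : String) : Prop := out = build_files_content_py_alt files max_chars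
instance (files : List (String × String)) (max_chars : Int) (out : String) : Decidable (Spec_build_files_content_py files max_chars out) := by unfold Spec_build_files_content_py; infer_instance

-- ===== CLAIM (what is proved, stated in full; the proofs are below) =====
def Claim_equal_build_files_content_py : Prop := ∀ (files : List (String × String)) (max_chars : Int), Dom_build_files_content_py files max_chars → Spec_build_files_content_py files max_chars (build_files_content_py files max_chars)

-- ===== LEMMAS AND PROOFS =====

-- reference form: consume chunks while the running budget allows, truncate at the first overflow
def pvGlue (m : Int) : List (List Char) → List (List Char)
  | [] => []
  | c :: cs =>
    if (c.length : Int) > m then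
      [PySem.List.slice c none (some m) ++ "\n[TRUNCATED]".toList]
    else
      c :: pvGlue (m - (c.length : Int)) cs

-- prefix sums starting at s (what B's cum fold computes)
def pvSums (s : Int) : List (List Char) → List Int
  | [] => [s]
  | c :: cs => s :: pvSums (s + (c.length : Int)) cs

theorem pvLoopA_eq_glue (max_chars : Int) :
    ∀ (files : List (String × String)) (total : Int),
      pvLoopA max_chars files total = pvGlue (max_chars - total) (files.map (fun p => pvChunk p.1 p.2)) := by
  intro files
  induction files with
  | nil => intro total; rfl
  | cons p rest ih =>
    intro total
    simp only [pvLoopA, pvGlue, List.map_cons]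
    by_cases h : total + ((pvChunk p.1 p.2).length : Int) > max_chars
    · rw [if_pos h]
      rw [if_pos (show ((pvChunk p.1 p.2).length : Int) > max_chars - total by omega)]
    · rw [if_neg h]
      rw [if_neg (show ¬ ((pvChunk p.1 p.2).length : Int) > max_chars - total by omega), ih,
          show max_chars - (total + ((pvChunk p.1 p.2).length : Int))
              = max_chars - total - ((pvChunk p.1 p.2).length : Int) by ring]

theorem pvFoldl_sums :
    ∀ (cs : List (List Char)) (acc : List Int) (s : Int),
      cs.foldl (fun a c => a ++ [a.getLastD 0 + (c.length : Int)]) (acc ++ [s]) = acc ++ pvSums s cs := by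
  intro cs
  induction cs with
  | nil => intro acc s; simp [pvSums]
  | cons c cs ih =>
    intro acc s
    simp only [List.foldl_cons, pvSums]
    have h1 : (acc ++ [s]).getLastD 0 = s := by simp
    rw [h1, ih (acc ++ [s]) (s + (c.length : Int))]
    simp

theorem pvSums_length (s : Int) (cs : List (List Char)) : (pvSums s cs).length = cs.length + 1 := by
  induction cs generalizing s with
  | nil => rfl
  | cons c cs ih => simp [pvSums, ih]

theorem pvSums_add : ∀ (cs : List (List Char)) (a s : Int), pvSums (a + s) cs = (pvSums s cs).map (a + ·) := by
  intro cs
  induction cs with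
  | nil => intro a s; rfl
  | cons c cs ih =>
    intro a s
    simp only [pvSums, List.map_cons]
    rw [add_assoc, ih]

theorem pvSums_getD_map (cs : List (List Char)) (a s : Int) (i : Nat) (hi : i < cs.length + 1) :
    ((pvSums s cs).map (a + ·)).getD i 0 = a + (pvSums s cs).getD i 0 := by
  have hlen : i < (pvSums s cs).length := by rw [pvSums_length]; omega
  simp [List.getD_eq_getElem?_getD, List.getElem?_map, List.getElem?_eq_getElem hlen]

theorem pvFindCongr {α : Type} (p q : α → Bool) : ∀ (l : List α), (∀ a ∈ l, p a = q a) → l.find? p = l.find? q := by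
  intro l
  induction l with
  | nil => intro _; rfl
  | cons a l ih =>
    intro h
    rw [List.find?_cons, List.find?_cons, h a (by simp)]
    cases q a
    · exact ih (fun x hx => h x (by simp [hx]))
    · rfl

-- B's assembled parts (for a given chunk list) equal the reference form
theorem pvPartsB_eq_glue :
    ∀ (chunks : List (List Char)) (m : Int),
      (match (List.range chunks.length).find?
          (fun i => decide ((chunks.foldl (fun a c => a ++ [a.getLastD 0 + (c.length : Int)]) [0]).getD (i + 1) 0 > m)) with
        | none => chunks
        | some cut =>
            chunks.take cut ++
              [PySem.List.slice (chunks.getD cut []) none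
                  (some (m - (chunks.foldl (fun a c => a ++ [a.getLastD 0 + (c.length : Int)]) [0]).getD cut 0)) ++
                "\n[TRUNCATED]".toList]) = pvGlue m chunks := by
  intro chunks
  have hcum : ∀ (cs : List (List Char)),
      cs.foldl (fun a c => a ++ [a.getLastD 0 + (c.length : Int)]) [0] = pvSums 0 cs := by
    intro cs
    have := pvFoldl_sums cs [] 0
    simpa using this
  induction chunks with
  | nil => intro m; rfl
  | cons c cs ih =>
    intro m
    rw [hcum]
    have hcum' := hcum cs
    rw [hcum'] at ih
    have hsums : pvSums 0 (c :: cs) = 0 :: (pvSums 0 cs).map (((c.length : Int)) + ·) := by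
      simp only [pvSums, zero_add]
      conv_lhs => rw [show ((c.length : Int)) = (c.length : Int) + 0 by ring]
      rw [pvSums_add]
    rw [hsums]
    rw [List.length_cons, List.range_succ_eq_map]
    have hh : (pvSums 0 cs)[0]? = some (0 : Int) := by
      cases cs <;> simp [pvSums]
    by_cases h0 : ((c.length : Int)) > m
    · rw [List.find?_cons_of_pos (by simp [hh]; omega)]
      simp [pvGlue, h0]
    · rw [List.find?_cons_of_neg (by simp [hh]; omega)]
      rw [List.find?_map]
      simp only [pvGlue]
      rw [if_neg h0]
      have hpred : ∀ i ∈ List.range cs.length,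
          ((fun i => decide ((0 :: (pvSums 0 cs).map (((c.length : Int)) + ·)).getD (i + 1) 0 > m)) ∘ Nat.succ) i
            = (fun i => decide ((pvSums 0 cs).getD (i + 1) 0 > m - (c.length : Int))) i := by
        intro i hi
        simp only [Function.comp, List.getD_cons_succ]
        rw [pvSums_getD_map cs (c.length : Int) 0 (i + 1) (by simp at hi; omega)]
        simp only [decide_eq_decide]
        omega
      rw [pvFindCongr _ _ _ hpred]
      rcases hfind : (List.range cs.length).find?
          (fun i => decide ((pvSums 0 cs).getD (i + 1) 0 > m - (c.length : Int))) with _ | cut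
      · simp only [Option.map_none]
        have := ih (m - (c.length : Int))
        rw [hfind] at this
        rw [← this]
      · simp only [Option.map_some]
        have := ih (m - (c.length : Int))
        rw [hfind] at this
        rw [← this]
        have hcut : cut < cs.length := by
          have := List.find?_some hfind
          have hmem := List.mem_of_find?_eq_some hfind
          simpa using hmem
        simp only [List.take_succ_cons, List.getD_cons_succ, List.cons_append]
        rw [pvSums_getD_map cs (c.length : Int) 0 cut (by omega),
            show m - ((c.length : Int) + (pvSums 0 cs).getD cut 0)
                = m - (c.length : Int) - (pvSums 0 cs).getD cut 0 by ring]

theorem build_files_content_py_spec : Claim_equal_build_files_content_py := by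
  intro files max_chars _
  unfold Spec_build_files_content_py
  unfold build_files_content_py build_files_content_py_alt
  dsimp only
  rw [pvLoopA_eq_glue max_chars files 0, show max_chars - 0 = max_chars by ring,
      ← pvPartsB_eq_glue (files.map (fun p => pvChunk p.1 p.2)) max_chars]
  rcases hfind : (List.range (files.map (fun p => pvChunk p.1 p.2)).length).find?
      (fun i => decide (((files.map (fun p => pvChunk p.1 p.2)).foldl
          (fun a c => a ++ [a.getLastD 0 + (c.length : Int)]) [0]).getD (i + 1) 0 > max_chars)) with _ | cut <;>
    simp only [hfind]
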